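-- pv_equiv track=rewrite | github.com/mpcousi/adventofcode2024 | day22.py | highest_last_four_diffs
-- ===== SOURCE A (Python) =====
-- from collections import deque
--
-- def next_secret(previous_secret):
--     step1 = (previous_secret ^ (previous_secret * 64)) % 16777216
--     step2 = (step1 ^ (step1 // 32)) % 16777216
--     step3 = (step2 ^ (step2 * 2048)) % 16777216
--     return step3
--
-- def highest_last_four_diffs(secret, num_times):
--     highest_changes = {}
--     last_four_diffs = deque()
--     last_price = secret % 10
--     for i in range(num_times):
--         secret = next_secret(secret)
--         price = secret % 10
--         diff_price = price - last_price
--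
--         last_four_diffs.append(diff_price)
--         if i > 3:
--             last_four_diffs.popleft()
--         if i > 2:
--             node = tuple(last_four_diffs)
--             if node not in highest_changes:
--                 highest_changes[node] = price
--         last_price = price
--
--     return highest_changes
-- ===== SOURCE B (Python) =====
-- def next_secret(previous_secret):
--     step1 = (previous_secret ^ (previous_secret * 64)) % 16777216
--     step2 = (step1 ^ (step1 // 32)) % 16777216
--     step3 = (step2 ^ (step2 * 2048)) % 16777216
--     return step3
--
-- def highest_last_four_diffs(secret, num_times):
--     # pass 1: full price sequence
--     prices = [secret % 10]
--     s = secret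
--     for _ in range(num_times):
--         s = next_secret(s)
--         prices.append(s % 10)
--     # pass 2: consecutive differences
--     diffs = [prices[j + 1] - prices[j] for j in range(len(prices) - 1)]
--     # pass 3: first-seen price for each 4-diff window
--     res = {}
--     for j in range(len(diffs) - 3):
--         key = tuple(diffs[j:j + 4])
--         if key not in res:
--             res[key] = prices[j + 4]
--     return res
-- ===== Notes on version B (the rewrite author's own statement) =====
-- stated objective: alternative
-- what changed: Replaces A's single incremental loop with a sliding deque and in-loop bookkeeping by three separate passes: build the full prices list, derive the diffs list, then scan 4-diff windows by index into a first-seen dict.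
import Mathlib
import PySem

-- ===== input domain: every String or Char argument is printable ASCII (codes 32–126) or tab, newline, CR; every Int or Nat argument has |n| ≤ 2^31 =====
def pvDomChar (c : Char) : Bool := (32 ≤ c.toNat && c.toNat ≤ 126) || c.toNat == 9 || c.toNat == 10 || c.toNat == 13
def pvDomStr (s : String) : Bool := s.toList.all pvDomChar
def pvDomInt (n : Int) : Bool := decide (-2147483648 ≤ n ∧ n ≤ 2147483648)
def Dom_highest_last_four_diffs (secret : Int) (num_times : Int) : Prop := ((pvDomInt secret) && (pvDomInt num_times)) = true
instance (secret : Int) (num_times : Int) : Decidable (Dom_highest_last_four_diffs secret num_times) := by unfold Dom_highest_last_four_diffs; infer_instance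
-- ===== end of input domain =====

-- B separates the work into three plain passes (prices list, diffs list, window loop)
-- instead of A's single incremental loop with a sliding deque; objective: alternative (same cost).

-- ===== PORT A =====
def next_secret (previous_secret : Int) : Int :=
  let step1 := PySem.Int.mod (PySem.Int.bxor previous_secret (previous_secret * 64)) 16777216
  let step2 := PySem.Int.mod (PySem.Int.bxor step1 (PySem.Int.floordiv step1 32)) 16777216
  let step3 := PySem.Int.mod (PySem.Int.bxor step2 (step2 * 2048)) 16777216
  step3

def highest_last_four_diffs (secret : Int) (num_times : Int) : List (List Int × Int) :=
  ((PySem.List.pyRange 0 num_times 1).foldl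
    (fun (st : PySem.Dict (List Int) Int × List Int × Int × Int) i =>
      let s' := next_secret st.2.2.2
      let price := PySem.Int.mod s' 10
      let diff_price := price - st.2.2.1
      let lfd1 := st.2.1 ++ [diff_price]
      let lfd2 := if i > 3 then lfd1.tail else lfd1
      let hc := if i > 2 then
          (if st.1.contains lfd2 then st.1 else st.1.insert lfd2 price)
        else st.1
      (hc, lfd2, price, s'))
    (PySem.Dict.empty, [], PySem.Int.mod secret 10, secret)).1.items

-- ===== PORT B =====
def highest_last_four_diffs_alt (secret : Int) (num_times : Int) : List (List Int × Int) :=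
  -- pass 1: full price sequence
  let prices := ((PySem.List.pyRange 0 num_times 1).foldl
    (fun (st : List Int × Int) _ =>
      let s' := next_secret st.2
      (st.1 ++ [PySem.Int.mod s' 10], s'))
    ([PySem.Int.mod secret 10], secret)).1
  -- pass 2: consecutive differences
  let diffs := (PySem.List.pyRange 0 ((prices.length : Int) - 1) 1).map
    (fun j => PySem.List.pyGetD prices (j + 1) 0 - PySem.List.pyGetD prices j 0)
  -- pass 3: first-seen price for each 4-diff window
  ((PySem.List.pyRange 0 ((diffs.length : Int) - 3) 1).foldl
    (fun (d : PySem.Dict (List Int) Int) j =>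
      let key := PySem.List.slice diffs (some j) (some (j + 4))
      if d.contains key then d else d.insert key (PySem.List.pyGetD prices (j + 4) 0))
    PySem.Dict.empty).items

-- ===== PRECONDITION & SPEC =====
def Spec_highest_last_four_diffs (secret : Int) (num_times : Int) (out : List (List Int × Int)) : Prop := out = highest_last_four_diffs_alt secret num_times
instance (secret : Int) (num_times : Int) (out : List (List Int × Int)) : Decidable (Spec_highest_last_four_diffs secret num_times out) := by unfold Spec_highest_last_four_diffs; infer_instance

-- ===== CLAIM (what is proved, stated in full; the proofs are below) =====
def Claim_equal_highest_last_four_diffs : Prop := ∀ (secret : Int) (num_times : Int), Dom_highest_last_four_diffs secret num_times → Spec_highest_last_four_diffs secret num_times (highest_last_four_diffs secret num_times)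


-- ===== LEMMAS AND PROOFS =====

-- the secret after k steps, the k-th price and the j-th price difference
def pvS (secret : Int) : Nat → Int
  | 0 => secret
  | k+1 => next_secret (pvS secret k)

def pvPr (secret : Int) (k : Nat) : Int := PySem.Int.mod (pvS secret k) 10

def pvDf (secret : Int) (j : Nat) : Int := pvPr secret (j+1) - pvPr secret j

def pvWin (secret : Int) (k : Nat) : List Int :=
  [pvDf secret k, pvDf secret (k+1), pvDf secret (k+2), pvDf secret (k+3)]

-- the common dictionary both programs build, after n steps
def pvDict (secret : Int) (n : Nat) : PySem.Dict (List Int) Int :=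
  (List.range (n-3)).foldl
    (fun d k => if d.contains (pvWin secret k) then d
                else d.insert (pvWin secret k) (pvPr secret (k+4)))
    PySem.Dict.empty

lemma pvRange_toNat (m : Int) :
    PySem.List.pyRange 0 m 1 = PySem.List.pyRange 0 (m.toNat : Int) 1 := by
  have h : (m - 0).toNat = ((m.toNat : Int) - 0).toNat := by omega
  rw [PySem.List.pyRange_one, PySem.List.pyRange_one, h]

lemma pvWindow (f : Nat → Int) (n k : Nat) (h : k + 4 ≤ n) :
    (((List.range n).map f).drop k).take 4 = [f k, f (k+1), f (k+2), f (k+3)] := by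
  rw [← List.map_drop, ← List.map_take, List.range_eq_range', List.drop_range',
      List.take_range'_of_length_ge (by omega)]
  simp [List.range']

-- A's loop invariant
lemma pvAfold (secret : Int) (n : Nat) :
    (PySem.List.pyRange 0 (n : Int) 1).foldl
      (fun (st : PySem.Dict (List Int) Int × List Int × Int × Int) i =>
        let s' := next_secret st.2.2.2
        let price := PySem.Int.mod s' 10
        let diff_price := price - st.2.2.1
        let lfd1 := st.2.1 ++ [diff_price]
        let lfd2 := if i > 3 then lfd1.tail else lfd1
        let hc := if i > 2 then
            (if st.1.contains lfd2 then st.1 else st.1.insert lfd2 price)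
          else st.1
        (hc, lfd2, price, s'))
      (PySem.Dict.empty, [], PySem.Int.mod secret 10, secret)
    = (pvDict secret n, ((List.range n).map (pvDf secret)).drop (n-4),
       pvPr secret n, pvS secret n) := by
  induction n with
  | zero =>
    rw [PySem.List.pyRange_one_eq_nil (by omega)]
    simp [pvDict, pvS, pvPr]
  | succ n ih =>
    have hc : ((n+1 : Nat) : Int) = (n : Int) + 1 := by push_cast; ring
    rw [hc, PySem.List.pyRange_one_succ_right (by omega), List.foldl_append, ih]
    simp only [List.foldl_cons, List.foldl_nil, gt_iff_lt, Prod.mk.injEq]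
    have hsucc : (List.range (n+1)).map (pvDf secret)
        = (List.range n).map (pvDf secret) ++ [pvDf secret n] := by
      rw [List.range_succ, List.map_append]; rfl
    have hx : PySem.Int.mod (next_secret (pvS secret n)) 10 - pvPr secret n
        = pvDf secret n := rfl
    have hW : (if (3 : Int) < (n : Int) then
              ((((List.range n).map (pvDf secret)).drop (n-4)) ++
                [PySem.Int.mod (next_secret (pvS secret n)) 10 - pvPr secret n]).tail
            else (((List.range n).map (pvDf secret)).drop (n-4)) ++
                [PySem.Int.mod (next_secret (pvS secret n)) 10 - pvPr secret n])
        = ((List.range (n+1)).map (pvDf secret)).drop (n+1-4) := by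
      rw [hx, hsucc]
      by_cases h4 : (3 : Int) < (n : Int)
      · rw [if_pos h4,
            ← List.drop_append_of_le_length (by simp),
            List.tail_drop]
        congr 1
        omega
      · rw [if_neg h4]
        have h0 : n - 4 = 0 := by omega
        have h1 : n + 1 - 4 = 0 := by omega
        rw [h0, h1, List.drop_zero, List.drop_zero]
    refine ⟨?_, hW, rfl, rfl⟩
    rw [hW]
    by_cases h3 : (2 : Int) < (n : Int)
    · rw [if_pos h3]
      have hwin : ((List.range (n+1)).map (pvDf secret)).drop (n+1-4)
          = pvWin secret (n-3) := by
        have hlen : (((List.range (n+1)).map (pvDf secret)).drop (n+1-4)).length ≤ 4 := by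
          simp
          omega
        rw [← List.take_of_length_le hlen]
        have he : n + 1 - 4 = n - 3 := by omega
        rw [he, pvWindow (pvDf secret) (n+1) (n-3) (by omega)]
        simp only [pvWin]
      rw [hwin]
      have hD : pvDict secret (n+1)
          = (if (pvDict secret n).contains (pvWin secret (n-3)) then pvDict secret n
             else (pvDict secret n).insert (pvWin secret (n-3)) (pvPr secret ((n-3)+4))) := by
        unfold pvDict
        have hr : n + 1 - 3 = (n - 3) + 1 := by omega
        rw [hr, List.range_succ, List.foldl_append]
        simp
      rw [hD]
      have hv : (n-3) + 4 = n + 1 := by omega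
      rw [hv]
      rfl
    · rw [if_neg h3]
      unfold pvDict
      have hr : n + 1 - 3 = n - 3 := by omega
      rw [hr]

-- B's first pass builds the full price list
lemma pvBprices (secret : Int) (n : Nat) :
    (PySem.List.pyRange 0 (n : Int) 1).foldl
      (fun (st : List Int × Int) _ =>
        let s' := next_secret st.2
        (st.1 ++ [PySem.Int.mod s' 10], s'))
      ([PySem.Int.mod secret 10], secret)
    = ((List.range (n+1)).map (pvPr secret), pvS secret n) := by
  induction n with
  | zero =>
    rw [PySem.List.pyRange_one_eq_nil (by omega)]
    simp [pvS, pvPr]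
  | succ n ih =>
    have hc : ((n+1 : Nat) : Int) = (n : Int) + 1 := by push_cast; ring
    rw [hc, PySem.List.pyRange_one_succ_right (by omega), List.foldl_append, ih]
    simp only [List.foldl_cons, List.foldl_nil]
    rw [List.range_succ (n := n+1)]
    simp [pvS, pvPr]

-- B's second pass is the difference sequence
lemma pvBdiffs (secret : Int) (n : Nat) :
    (PySem.List.pyRange 0 (((((List.range (n+1)).map (pvPr secret)).length : Int)) - 1) 1).map
      (fun j => PySem.List.pyGetD ((List.range (n+1)).map (pvPr secret)) (j + 1) 0
              - PySem.List.pyGetD ((List.range (n+1)).map (pvPr secret)) j 0)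
    = (List.range n).map (pvDf secret) := by
  have hl : ((((List.range (n+1)).map (pvPr secret)).length : Int)) - 1 = (n : Int) := by
    simp
  rw [hl, PySem.List.pyRange_zero_natCast, List.map_map]
  refine List.map_congr_left ?_
  intro k hk
  have hk' : k < n := List.mem_range.mp hk
  simp only [Function.comp]
  have h1 : ((k : Int) + 1) = ((k + 1 : Nat) : Int) := by push_cast; ring
  rw [h1, PySem.List.pyGetD_natCast, PySem.List.pyGetD_natCast,
      PySem.List.getD_map_range _ _ _ _ (by omega), PySem.List.getD_map_range _ _ _ _ (by omega)]
  rfl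

-- B's third pass builds pvDict
lemma pvBdict (secret : Int) (n : Nat) :
    (PySem.List.pyRange 0 (((((List.range n).map (pvDf secret)).length : Int)) - 3) 1).foldl
      (fun (d : PySem.Dict (List Int) Int) j =>
        let key := PySem.List.slice ((List.range n).map (pvDf secret)) (some j) (some (j + 4))
        if d.contains key then d
        else d.insert key (PySem.List.pyGetD ((List.range (n+1)).map (pvPr secret)) (j + 4) 0))
      PySem.Dict.empty
    = pvDict secret n := by
  have hl : ((((List.range n).map (pvDf secret)).length : Int)) - 3 = ((n : Int) - 3) := by
    simp
  have h2 : ((n : Int) - 3).toNat = n - 3 := by omega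
  rw [hl, pvRange_toNat, h2, PySem.List.pyRange_zero_natCast, List.foldl_map]
  unfold pvDict
  refine PySem.List.foldl_congr_mem _ _ _ _ ?_
  intro d k hk
  have hk' : k + 4 ≤ n := by have := List.mem_range.mp hk; omega
  simp only
  have h4 : ((k : Int) + 4) = ((k + 4 : Nat) : Int) := by push_cast; ring
  rw [h4, PySem.List.slice_natCast, PySem.List.pyGetD_natCast,
      PySem.List.getD_map_range _ _ _ _ (by omega)]
  have h5 : k + 4 - k = 4 := by omega
  rw [h5, pvWindow (pvDf secret) n k hk']
  rfl

-- ===== VERDICT (by name: the statement is the Claim_ definition above) =====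
theorem highest_last_four_diffs_spec : Claim_equal_highest_last_four_diffs := by
  intro secret num_times _
  unfold Spec_highest_last_four_diffs highest_last_four_diffs highest_last_four_diffs_alt
  rw [pvRange_toNat num_times]
  rw [pvAfold secret num_times.toNat, pvBprices secret num_times.toNat]
  simp only
  rw [pvBdiffs secret num_times.toNat, pvBdict secret num_times.toNat]
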